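-- pv_equiv track=rewrite | github.com/smullins7/advent-of-code | 2024/day_9.py | keep_going
-- ===== SOURCE A (Python) =====
-- def keep_going(exploded: list[str]) -> bool:
--     found_blank = False
--     for c in exploded:
--         if found_blank and c != ".":
--             return True
--         if c == ".":
--             found_blank = True
--     return False
-- ===== SOURCE B (Python) =====
-- def keep_going(exploded: list[str]) -> bool:
--     if "." not in exploded:
--         return False
--     i = exploded.index(".")
--     return any(c != "." for c in exploded[i + 1:])
-- ===== Notes on version B (the rewrite author's own statement) =====
-- stated objective: simpler
-- what changed: Replaced the fused flag-tracking loop by a two-phase decomposition: find the index of the first blank, then check the suffix after it for any non-blank.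
import Mathlib
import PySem

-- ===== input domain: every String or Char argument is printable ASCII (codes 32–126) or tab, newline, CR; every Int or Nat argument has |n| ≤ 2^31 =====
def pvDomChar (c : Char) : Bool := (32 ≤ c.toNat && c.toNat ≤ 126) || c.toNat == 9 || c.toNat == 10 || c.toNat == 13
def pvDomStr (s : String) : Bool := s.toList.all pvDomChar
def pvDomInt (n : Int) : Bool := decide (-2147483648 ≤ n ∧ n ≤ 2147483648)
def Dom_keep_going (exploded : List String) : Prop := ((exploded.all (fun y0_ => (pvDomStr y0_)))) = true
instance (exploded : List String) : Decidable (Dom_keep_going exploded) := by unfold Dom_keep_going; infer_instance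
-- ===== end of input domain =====

-- B replaces A's single flag-tracking scan by a two-phase decomposition (find the first "."'s index, then scan the suffix); objective: simpler.

-- ===== PORT A =====
-- loop over exploded with the running flag found_blank; returning true maps to the `true` result
def keepGoingLoop : List String → Bool → Bool
  | [], _ => false
  | c :: rest, foundBlank =>
    if foundBlank && c != "." then true
    else keepGoingLoop rest (if c == "." then true else foundBlank)

def keep_going (exploded : List String) : Bool := keepGoingLoop exploded false

-- ===== PORT B =====
def keep_going_alt (exploded : List String) : Bool :=
  if !(exploded.contains ".") then false
  else
    match PySem.List.index? exploded "." with
    | none => false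
    | some i => (PySem.List.slice exploded (some ((i : Int) + 1)) none).any (fun c => c != ".")

-- ===== PRECONDITION & SPEC =====
def Spec_keep_going (exploded : List String) (out : Bool) : Prop := out = keep_going_alt exploded
instance (exploded : List String) (out : Bool) : Decidable (Spec_keep_going exploded out) := by unfold Spec_keep_going; infer_instance

-- ===== CLAIM (what is proved, stated in full; the proofs are below) =====
def Claim_equal_keep_going : Prop := ∀ (exploded : List String), Dom_keep_going exploded → Spec_keep_going exploded (keep_going exploded)

-- ===== LEMMAS AND PROOFS =====

-- once the flag is set, the loop is exactly "any non-blank in the rest"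
theorem keepGoingLoop_true (xs : List String) : keepGoingLoop xs true = xs.any (fun c => c != ".") := by
  induction xs with
  | nil => rfl
  | cons c rest ih =>
    by_cases hc : c = "."
    · subst hc; simp [keepGoingLoop, ih]
    · simp [keepGoingLoop, hc]

theorem loop_eq_alt (xs : List String) : keepGoingLoop xs false = keep_going_alt xs := by
  induction xs with
  | nil => rfl
  | cons c rest ih =>
    by_cases hc : c = "."
    · subst hc
      have hidx : PySem.List.index? ("." :: rest) "." = some 0 := PySem.List.index?_cons_self ..
      have hloop : keepGoingLoop ("." :: rest) false = keepGoingLoop rest true := by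
        simp [keepGoingLoop]
      rw [hloop, keepGoingLoop_true]
      simp only [keep_going_alt, hidx]
      have h1 : (((0 : Nat) : Int) + 1) = (1 : Int) := by norm_num
      rw [h1, PySem.List.slice_from_one]
      simp
    · have hcf : (c == ".") = false := beq_eq_false_iff_ne.mpr hc
      have hcont : (c :: rest).contains "." = rest.contains "." := by
        simp
        intro h; exact absurd h.symm hc
      have hidx : PySem.List.index? (c :: rest) "." = (PySem.List.index? rest ".").map (· + 1) :=
        PySem.List.index?_cons_of_ne _ hc
      have hloop : keepGoingLoop (c :: rest) false = keepGoingLoop rest false := by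
        simp [keepGoingLoop, hc]
      rw [hloop, ih]
      unfold keep_going_alt
      rw [hcont, hidx]
      cases hr : PySem.List.index? rest "." with
      | none => simp
      | some i =>
        have hmem : "." ∈ rest := (PySem.List.index?_isSome_iff rest ".").mp (by rw [hr]; rfl)
        have hc1 : rest.contains "." = true := by simpa using hmem
        have hcast2 : ((i : Int) + 1 : Int) = (((i + 1 : Nat)) : Int) := by push_cast; ring
        have hcast : (((i + 1 : Nat)) : Int) + 1 = (((i + 2 : Nat)) : Int) := by push_cast; ring
        simp only [Option.map_some, hc1, hcast2, hcast]
        rw [PySem.List.slice_from_natCast, PySem.List.slice_from_natCast]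
        simp

-- ===== VERDICT (by name: the statement is the Claim_ definition above) =====
theorem keep_going_spec : Claim_equal_keep_going := by
  intro xs _
  unfold Spec_keep_going keep_going
  exact loop_eq_alt xs
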